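-- pv_equiv track=rewrite | github.com/SoftwareProcess/assignmentdodoku-Kurumil | dodoku/insert.py | _is_valid_nine_nums
-- ===== SOURCE A (Python) =====
-- def _is_valid_nine_nums(nine_nums):
--
--     for num in nine_nums:
--         if not num <= 9:
--             return False
--     s = set()
--     for num in nine_nums:
--         if num == 0:
--             continue
--         if num in s:
--             return False
--         else:
--             s.add(num)
--     return True
-- ===== SOURCE B (Python) =====
-- def _is_valid_nine_nums(nine_nums):
--     for num in nine_nums:
--         if not num <= 9:
--             return False
--     nonzeros = sorted(n for n in nine_nums if n != 0)
--     for i in range(1, len(nonzeros)):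
--         if nonzeros[i] == nonzeros[i - 1]:
--             return False
--     return True
-- ===== Notes on version B (the rewrite author's own statement) =====
-- stated objective: idiomatic
-- what changed: Duplicate detection among nonzeros is done by sorting the nonzero values and scanning adjacent pairs instead of A's incremental hash-set membership loop.
import Mathlib
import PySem

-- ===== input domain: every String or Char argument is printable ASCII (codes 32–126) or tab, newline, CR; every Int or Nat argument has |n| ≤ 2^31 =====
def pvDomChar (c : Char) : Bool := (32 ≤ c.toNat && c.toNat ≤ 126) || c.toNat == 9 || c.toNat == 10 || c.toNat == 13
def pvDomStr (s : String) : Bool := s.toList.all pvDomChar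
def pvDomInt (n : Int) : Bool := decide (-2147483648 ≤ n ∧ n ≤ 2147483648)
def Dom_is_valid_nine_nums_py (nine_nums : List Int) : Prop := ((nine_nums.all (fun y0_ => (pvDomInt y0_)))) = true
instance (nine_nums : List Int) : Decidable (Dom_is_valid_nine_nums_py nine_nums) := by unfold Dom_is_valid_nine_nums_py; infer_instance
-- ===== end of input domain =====

-- ===== PORT A =====
-- B replaces A's set-based duplicate check by sort-and-adjacent-scan (idiomatic alternative); return value only, no mutation.
def pvLe9A : List Int → Bool
  | [] => true
  | n :: t => if ¬ (n ≤ 9) then false else pvLe9A t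

def pvDedupLoopA : PySem.Set Int → List Int → Bool
  | _, [] => true
  | s, n :: t =>
    if n = 0 then pvDedupLoopA s t
    else if PySem.Set.contains s n then false
    else pvDedupLoopA (PySem.Set.add s n) t

def is_valid_nine_nums_py (nine_nums : List Int) : Bool :=
  if pvLe9A nine_nums then pvDedupLoopA PySem.Set.empty nine_nums else false

-- ===== PORT B =====
def pvLe9B : List Int → Bool
  | [] => true
  | n :: t => if ¬ (n ≤ 9) then false else pvLe9B t

-- the 'for i in range(1, len(nonzeros))' adjacent-pair scan of Source B
def pvAdjScanB : List Int → Bool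
  | a :: b :: t => if b = a then false else pvAdjScanB (b :: t)
  | _ => true

def is_valid_nine_nums_py_alt (nine_nums : List Int) : Bool :=
  if pvLe9B nine_nums then
    pvAdjScanB (PySem.List.sorted (nine_nums.filter (fun n => decide (n ≠ 0))) (fun x => x) false)
  else false

-- ===== PRECONDITION & SPEC =====
def Spec_is_valid_nine_nums_py (nine_nums : List Int) (out : Bool) : Prop := out = is_valid_nine_nums_py_alt nine_nums
instance (nine_nums : List Int) (out : Bool) : Decidable (Spec_is_valid_nine_nums_py nine_nums out) := by unfold Spec_is_valid_nine_nums_py; infer_instance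

-- ===== CLAIM (what is proved, stated in full; the proofs are below) =====
def Claim_equal_is_valid_nine_nums_py : Prop := ∀ (nine_nums : List Int), Dom_is_valid_nine_nums_py nine_nums → Spec_is_valid_nine_nums_py nine_nums (is_valid_nine_nums_py nine_nums)

-- ===== LEMMAS AND PROOFS =====

theorem pvLe9_eq (l : List Int) : pvLe9A l = pvLe9B l := by
  induction l with
  | nil => rfl
  | cons n t ih => simp [pvLe9A, pvLe9B, ih]

theorem dedup_iff (l : List Int) (s : PySem.Set Int) :
    pvDedupLoopA s l = true ↔
      (l.filter (fun n => decide (n ≠ 0))).Nodup ∧ ∀ x ∈ l, x ≠ 0 → x ∉ s := by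
  induction l generalizing s with
  | nil => simp [pvDedupLoopA]
  | cons n t ih =>
    by_cases h0 : n = 0
    · subst h0
      simp [pvDedupLoopA, ih]
    · by_cases hm : PySem.Set.contains s n = true
      · have hmem : n ∈ s := by simpa [PySem.Set.contains] using hm
        simp only [pvDedupLoopA, if_neg h0, if_pos hm]
        constructor
        · intro h; cases h
        · rintro ⟨-, h⟩
          exact absurd (h n (by simp) h0) (by simp [hmem])
      · have hnm : n ∉ s := by simpa [PySem.Set.contains] using hm
        simp only [pvDedupLoopA, if_neg h0, if_neg hm]
        rw [ih]
        have hadd : PySem.Set.add s n = s ++ [n] := by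
          simp [PySem.Set.add, PySem.Set.contains, hnm]
        have hfc : (n :: t).filter (fun n => decide (n ≠ 0))
            = n :: t.filter (fun n => decide (n ≠ 0)) := by
          simp [h0]
        constructor
        · rintro ⟨hnd, hall⟩
          refine ⟨?_, ?_⟩
          · rw [hfc, List.nodup_cons]
            refine ⟨?_, hnd⟩
            intro hc
            rcases List.mem_filter.1 hc with ⟨hct, -⟩
            have := hall n hct h0
            simp [hadd] at this
          · intro x hx hx0
            rcases List.mem_cons.1 hx with rfl | hx'
            · exact hnm
            · have := hall x hx' hx0
              intro hc
              exact this (by simp [hadd, hc])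
        · rintro ⟨hnd, hall⟩
          rw [hfc, List.nodup_cons] at hnd
          refine ⟨hnd.2, ?_⟩
          intro x hx hx0
          simp only [hadd, List.mem_append, List.mem_singleton]
          rintro (hc | rfl)
          · exact hall x (List.mem_cons_of_mem _ hx) hx0 hc
          · exact hnd.1 (List.mem_filter.2 ⟨hx, by simpa using hx0⟩)

theorem adjscan_iff (l : List Int) (hs : l.Pairwise (· ≤ ·)) :
    pvAdjScanB l = true ↔ l.Nodup := by
  induction l with
  | nil => simp [pvAdjScanB]
  | cons a t ih =>
    cases t with
    | nil => simp [pvAdjScanB]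
    | cons b u =>
      rcases List.pairwise_cons.1 hs with ⟨hab, htail⟩
      by_cases hba : b = a
      · subst hba
        simp [pvAdjScanB, List.nodup_cons]
      · simp only [pvAdjScanB, if_neg hba]
        rw [ih htail]
        have hnotmem : a ∉ b :: u := by
          intro hc
          rcases List.mem_cons.1 hc with rfl | hc'
          · exact hba rfl
          · have hab' : a ≤ b := hab b (by simp)
            have hbx : b ≤ a := (List.pairwise_cons.1 htail).1 a hc'
            exact hba (le_antisymm hbx hab')
        simp [List.nodup_cons, hnotmem]

-- ===== VERDICT (by name: the statement is the Claim_ definition above) =====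
theorem is_valid_nine_nums_py_spec : Claim_equal_is_valid_nine_nums_py := by
  intro l _
  unfold Spec_is_valid_nine_nums_py
  unfold is_valid_nine_nums_py is_valid_nine_nums_py_alt
  rw [pvLe9_eq]
  by_cases h : pvLe9B l = true
  · simp only [if_pos h]
    have hperm := PySem.List.sorted_perm (l.filter (fun n => decide (n ≠ 0))) (fun x => x) false
    rw [Bool.eq_iff_iff, dedup_iff,
        adjscan_iff _ (by simpa using PySem.List.sorted_pairwise (l.filter (fun n => decide (n ≠ 0))) (fun x => x)),
        hperm.nodup_iff]
    simp [PySem.Set.empty]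
  · simp [h]
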